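-- pv_equiv track=rewrite | github.com/andrterrius/antic | src/profiles_store.py | tags_from_delimited_text
-- ===== SOURCE A (Python) =====
-- from typing import Any
--
-- def normalize_tags_list(raw: Any) -> list[str]:
--     """Строки тегов без пустых и без повторов (порядок первого вхождения)."""
--     if raw is None:
--         return []
--     if not isinstance(raw, list):
--         return []
--     out: list[str] = []
--     seen: set[str] = set()
--     for x in raw:
--         s = str(x).strip()
--         if not s or s in seen:
--             continue
--         seen.add(s)
--         out.append(s)
--     return out
--
-- def tags_from_delimited_text(text: str) -> list[str]:
--     """Разбор строки тегов: запятая, точка с запятой, вертикальная черта или перевод строки."""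
--     if not (text or "").strip():
--         return []
--     parts: list[str] = []
--     buf: list[str] = []
--     for ch in text.replace("\r\n", "\n").replace("\r", "\n"):
--         if ch in ",;|\n":
--             piece = "".join(buf).strip()
--             if piece:
--                 parts.append(piece)
--             buf = []
--         else:
--             buf.append(ch)
--     tail = "".join(buf).strip()
--     if tail:
--         parts.append(tail)
--     return normalize_tags_list(parts)
-- ===== SOURCE B (Python) =====
-- def tags_from_delimited_text(text: str) -> list[str]:
--     """Разбор строки тегов: один проход по индексам — максимальные куски без разделителей, дедупликация на лету."""
--     out: list[str] = []
--     i, n = 0, len(text)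
--     while i < n:
--         j = i
--         while j < n and text[j] not in ",;|\r\n":
--             j += 1
--         s = text[i:j].strip()
--         if s and s not in out:
--             out.append(s)
--         i = j + 1
--     return out
-- ===== Notes on version B (the rewrite author's own statement) =====
-- stated objective: simpler
-- what changed: A normalizes line endings via string replaces, then runs a char-by-char state machine with an explicit buffer to collect pieces and a second normalize pass (seen-set + output list) to dedup; B is one index scan that extracts each maximal delimiter-free run directly, strips it and dedups against the output list on the fly, with no replace pass, no buffer and no separate normalize step.
import Mathlib
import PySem

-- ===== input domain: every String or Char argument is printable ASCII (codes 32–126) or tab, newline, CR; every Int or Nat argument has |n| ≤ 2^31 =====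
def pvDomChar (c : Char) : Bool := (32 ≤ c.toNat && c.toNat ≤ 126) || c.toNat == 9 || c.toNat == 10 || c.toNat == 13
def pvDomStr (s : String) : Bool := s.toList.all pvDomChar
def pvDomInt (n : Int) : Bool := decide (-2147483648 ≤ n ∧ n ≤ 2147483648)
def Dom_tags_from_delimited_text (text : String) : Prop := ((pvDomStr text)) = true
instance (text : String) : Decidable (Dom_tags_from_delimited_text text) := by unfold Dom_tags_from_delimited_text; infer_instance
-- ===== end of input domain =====

-- B replaces A's char-by-char buffer state machine plus a separate normalize pass with a
-- single index scan over maximal delimiter-free runs that strips and dedups on the fly (objective: simpler).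

-- ===== PORT A =====
-- normalize_tags_list, at its list[str] call site (str(x) is the identity on str)
def pvNormStep (st : List String × PySem.Set String) (x : String) : List String × PySem.Set String :=
  let s := PySem.Str.strip x
  if s = "" ∨ s ∈ st.2 then st else (st.1 ++ [s], st.2.add s)

def pvNormalizeTagsList (raw : List String) : List String :=
  (raw.foldl pvNormStep ([], PySem.Set.ofList [])).1

-- the body of A's for-loop: ch in ",;|\n" flushes buf as a piece, otherwise buf.append(ch)
def pvStepA (st : List String × List Char) (ch : Char) : List String × List Char :=
  if ch ∈ [',', ';', '|', '\n'] then
    let piece := PySem.Chars.strip st.2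
    (if piece ≠ [] then st.1 ++ [String.ofList piece] else st.1, [])
  else (st.1, st.2 ++ [ch])

def tags_from_delimited_text (text : String) : List String :=
  if PySem.Str.strip text = "" then []
  else
    let t := PySem.Str.replace (PySem.Str.replace text "\r\n" "\n") "\r" "\n"
    let st := t.toList.foldl pvStepA ([], [])
    let tail := PySem.Chars.strip st.2
    pvNormalizeTagsList (if tail ≠ [] then st.1 ++ [String.ofList tail] else st.1)

-- ===== PORT B =====
def pvNotDelim (c : Char) : Bool := decide (c ∉ ([',', ';', '|', '\r', '\n'] : List Char))

-- B's while loop over the index i: each round takes the maximal delimiter-free run text[i:j],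
-- strips it, appends it when nonempty and new, and resumes at j+1
def pvAltGo (l : List Char) (out : List String) : List String :=
  if l = [] then out
  else
    let s := PySem.Chars.strip (l.takeWhile pvNotDelim)
    let out' := if s ≠ [] ∧ String.ofList s ∉ out then out ++ [String.ofList s] else out
    pvAltGo ((l.dropWhile pvNotDelim).drop 1) out'
termination_by l.length
decreasing_by
  have h := List.length_dropWhile_le pvNotDelim l
  simp only [List.length_drop]
  cases l with
  | nil => simp_all
  | cons c t => simp only [List.length_cons] at *; omega

def tags_from_delimited_text_alt (text : String) : List String :=
  pvAltGo text.toList []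

-- ===== PRECONDITION & SPEC =====
def Spec_tags_from_delimited_text (text : String) (out : List String) : Prop := out = tags_from_delimited_text_alt text
instance (text : String) (out : List String) : Decidable (Spec_tags_from_delimited_text text out) := by unfold Spec_tags_from_delimited_text; infer_instance

-- ===== CLAIM (what is proved, stated in full; the proofs are below) =====
def Claim_equal_tags_from_delimited_text : Prop := ∀ (text : String), Dom_tags_from_delimited_text text → Spec_tags_from_delimited_text text (tags_from_delimited_text text)

-- ===== LEMMAS AND PROOFS =====

-- `.replace("\r","\n")` is the character substitution pvSubst
def pvSubst (c : Char) : Char := if c = '\r' then '\n' else c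

-- `.replace("\r\n","\n")` collapses each "\r\n" into "\n"
def pvCollapse : List Char → List Char
  | [] => []
  | [c] => [c]
  | c1 :: c2 :: t =>
      if c1 = '\r' ∧ c2 = '\n' then '\n' :: pvCollapse t else c1 :: pvCollapse (c2 :: t)

-- A's fold-step after the substitution done by the replace chain
def pvStepA' (st : List String × List Char) (c : Char) : List String × List Char :=
  pvStepA st (pvSubst c)

-- the stripped, nonempty, maximal delimiter-free runs of l, in order
def pvPieces (l : List Char) : List String :=
  if l = [] then []
  else
    let s := PySem.Chars.strip (l.takeWhile pvNotDelim)
    (if s ≠ [] then [String.ofList s] else []) ++ pvPieces ((l.dropWhile pvNotDelim).drop 1)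
termination_by l.length
decreasing_by
  have h := List.length_dropWhile_le pvNotDelim l
  simp only [List.length_drop]
  cases l with
  | nil => simp_all
  | cons c t => simp only [List.length_cons] at *; omega

def pvAdd (out : List String) (s : String) : List String := if s ∉ out then out ++ [s] else out

def pvTailApp (st : List String × List Char) : List String :=
  if PySem.Chars.strip st.2 ≠ [] then st.1 ++ [String.ofList (PySem.Chars.strip st.2)] else st.1

-- ---- replace characterizations ----
lemma go_nil (old new : List Char) (fuel : Nat) (acc : List Char) :
    PySem.Chars.replace.go old new fuel [] acc = acc.reverse := by
  rw [PySem.Chars.replace.go.eq_def]; cases fuel <;> simp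

lemma go_r (fuel : Nat) : ∀ (l acc : List Char), l.length ≤ fuel →
    PySem.Chars.replace.go ['\r'] ['\n'] fuel l acc = acc.reverse ++ l.map pvSubst := by
  induction fuel with
  | zero =>
    intro l acc h
    rw [PySem.Chars.replace.go.eq_def]
    cases l with
    | nil => simp
    | cons c t => simp at h
  | succ n ih =>
    intro l acc h
    rw [PySem.Chars.replace.go.eq_def]
    cases l with
    | nil => simp
    | cons c t =>
      simp only [List.length_cons] at h
      simp only [List.isPrefixOf, List.isPrefixOf_nil_left (l := ([] : List Char))]
      by_cases hc : c = '\r'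
      · subst hc
        simp only [beq_self_eq_true, Bool.true_and, if_pos]
        rw [show (List.drop ['\r'].length ('\r' :: t)) = t by simp]
        rw [ih t _ (by omega)]
        simp [pvSubst]
      · rw [if_neg (by simp [hc, beq_iff_eq]; intro h'; exact hc h'.symm)]
        rw [ih t _ (by omega)]
        simp [pvSubst, hc]

lemma rep_r (l : List Char) :
    PySem.Chars.replace l ['\r'] ['\n'] = l.map pvSubst := by
  rw [PySem.Chars.replace]
  simp only [List.isEmpty_cons, if_neg]
  rw [go_r l.length l [] le_rfl]
  simp

lemma go_rn (fuel : Nat) : ∀ (l acc : List Char), l.length ≤ fuel →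
    PySem.Chars.replace.go ['\r', '\n'] ['\n'] fuel l acc = acc.reverse ++ pvCollapse l := by
  induction fuel using Nat.strong_induction_on with
  | _ fuel ih =>
    intro l acc h
    match fuel, l with
    | 0, [] => rw [PySem.Chars.replace.go.eq_def]; simp [pvCollapse]
    | 0, (c :: t) => simp at h
    | (n+1), [] => rw [PySem.Chars.replace.go.eq_def]; simp [pvCollapse]
    | (n+1), [c] =>
      rw [PySem.Chars.replace.go.eq_def]
      simp only [List.isPrefixOf, Bool.and_false, Bool.false_eq_true, if_false]
      rw [go_nil]
      simp [pvCollapse]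
    | (n+1), (c1 :: c2 :: t) =>
      rw [PySem.Chars.replace.go.eq_def]
      simp only [List.length_cons] at h
      by_cases hc : c1 = '\r' ∧ c2 = '\n'
      · obtain ⟨h1, h2⟩ := hc; subst h1; subst h2
        simp only [List.isPrefixOf, beq_self_eq_true, Bool.true_and, Bool.and_true, if_true,
          List.length_cons, List.length_nil, List.drop_succ_cons, List.drop_zero]
        rw [ih n (by omega) t _ (by omega)]
        simp [pvCollapse]
      · have hb : ((c1 == '\r') && ((c2 == '\n') && true)) = false := by
          rcases (Decidable.not_and_iff_or_not ..).mp hc with h' | h' <;>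
            simp [beq_iff_eq, h']
        simp only [List.isPrefixOf, hb, Bool.false_eq_true, if_false]
        rw [ih n (by omega) (c2 :: t) _ (by simp; omega)]
        rw [pvCollapse]
        simp [hc]
        intro h1 h2
        exact absurd ⟨h1.symm, h2.symm⟩ hc

lemma rep_rn (l : List Char) :
    PySem.Chars.replace l ['\r', '\n'] ['\n'] = pvCollapse l := by
  rw [PySem.Chars.replace]
  simp only [List.isEmpty_cons, if_neg]
  rw [go_rn l.length l [] le_rfl]
  simp

-- ---- the collapse step is invisible to A's fold ----
lemma stepA'_cr (st : List String × List Char) :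
    pvStepA' st '\r' = pvStepA' st '\n' := by
  simp [pvStepA', pvSubst]

lemma stepA'_flush (st : List String × List Char) :
    pvStepA' (pvStepA' st '\n') '\n' = pvStepA' st '\n' := by
  simp [pvStepA', pvSubst, pvStepA, PySem.Chars.strip, PySem.Chars.lstrip, PySem.Chars.rstrip]

lemma fold_collapse : ∀ (l : List Char) (st : List String × List Char),
    List.foldl pvStepA' st (pvCollapse l) = List.foldl pvStepA' st l := by
  intro l
  induction l using pvCollapse.induct with
  | case1 => intro st; rfl
  | case2 c => intro st; rfl
  | case3 c1 c2 t hc ih =>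
    intro st
    obtain ⟨h1, h2⟩ := hc
    subst h1; subst h2
    rw [pvCollapse, if_pos ⟨rfl, rfl⟩]
    simp only [List.foldl_cons]
    rw [ih, stepA'_cr, stepA'_flush]
  | case4 c1 c2 t hc ih =>
    intro st
    rw [pvCollapse, if_neg hc]
    simp only [List.foldl_cons]
    rw [ih, List.foldl_cons]

-- ---- stepA' in terms of pvNotDelim ----
lemma stepA'_delim (st : List String × List Char) (c : Char) (h : pvNotDelim c = false) :
    pvStepA' st c = (if PySem.Chars.strip st.2 ≠ [] then st.1 ++ [String.ofList (PySem.Chars.strip st.2)] else st.1, []) := by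
  simp only [pvNotDelim, decide_eq_false_iff_not, Decidable.not_not] at h
  fin_cases h <;> simp [pvStepA', pvSubst, pvStepA]

lemma stepA'_keep (st : List String × List Char) (c : Char) (h : pvNotDelim c = true) :
    pvStepA' st c = (st.1, st.2 ++ [c]) := by
  simp only [pvNotDelim, decide_eq_true_eq] at h
  have hc : c ≠ '\r' := fun h' => h (by simp [h'])
  have hm : c ∉ ([',', ';', '|', '\n'] : List Char) := by
    intro hmem
    apply h
    simp at hmem ⊢
    tauto
  simp [pvStepA', pvSubst, hc, pvStepA, hm]

-- ---- helpers about takeWhile/dropWhile on a clean prefix ----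
lemma takeWhile_clean_append (p : Char → Bool) (buf l : List Char) (h : ∀ c ∈ buf, p c = true) :
    (buf ++ l).takeWhile p = buf ++ l.takeWhile p := by
  induction buf with
  | nil => simp
  | cons b bs ih =>
    simp only [List.cons_append, List.takeWhile_cons, h b (by simp)]
    simpa using ih (fun c hc => h c (by simp [hc]))

lemma dropWhile_clean_append (p : Char → Bool) (buf l : List Char) (h : ∀ c ∈ buf, p c = true) :
    (buf ++ l).dropWhile p = l.dropWhile p := by
  induction buf with
  | nil => simp
  | cons b bs ih =>
    simp only [List.cons_append, List.dropWhile_cons, h b (by simp)]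
    simpa using ih (fun c hc => h c (by simp [hc]))

lemma pieces_clean (buf : List Char) (h : ∀ c ∈ buf, pvNotDelim c = true) :
    pvPieces buf = if PySem.Chars.strip buf ≠ [] then [String.ofList (PySem.Chars.strip buf)] else [] := by
  rw [pvPieces]
  cases hb : buf with
  | nil => simp [PySem.Chars.strip, PySem.Chars.lstrip, PySem.Chars.rstrip]
  | cons c t =>
    subst hb
    simp only [reduceCtorEq, if_false]
    rw [List.takeWhile_eq_self_iff.mpr h, List.dropWhile_eq_nil_iff.mpr h]
    rw [show (([] : List Char).drop 1) = [] from rfl, pvPieces]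
    simp

lemma pieces_delim_break (buf : List Char) (x : Char) (xs : List Char)
    (hbuf : ∀ c ∈ buf, pvNotDelim c = true) (hx : pvNotDelim x = false) :
    pvPieces (buf ++ x :: xs) =
      (if PySem.Chars.strip buf ≠ [] then [String.ofList (PySem.Chars.strip buf)] else []) ++ pvPieces xs := by
  rw [pvPieces, if_neg (by simp)]
  rw [takeWhile_clean_append _ _ _ hbuf, dropWhile_clean_append _ _ _ hbuf]
  simp only [List.takeWhile_cons, hx, List.dropWhile_cons]
  simp [hx]

-- ---- A's fold produces exactly the pieces ----
lemma foldA_pieces : ∀ (l : List Char) (parts : List String) (buf : List Char),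
    (∀ c ∈ buf, pvNotDelim c = true) →
    pvTailApp (List.foldl pvStepA' (parts, buf) l) = parts ++ pvPieces (buf ++ l) := by
  intro l
  induction l with
  | nil =>
    intro parts buf h
    simp only [List.foldl_nil, List.append_nil]
    rw [pieces_clean buf h]
    unfold pvTailApp
    split <;> simp
  | cons x xs ih =>
    intro parts buf h
    simp only [List.foldl_cons]
    cases hx : pvNotDelim x with
    | false =>
      rw [stepA'_delim _ _ hx]
      rw [ih _ [] (by intro c hc; simp at hc)]
      rw [pieces_delim_break buf x xs h hx]
      simp only [List.nil_append]
      split <;> simp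
    | true =>
      rw [stepA'_keep _ _ hx]
      rw [ih _ (buf ++ [x]) ?side]
      · simp
      case side =>
        intro c hc
        simp only [List.mem_append, List.mem_singleton] at hc
        rcases hc with hc | hc
        · exact h c hc
        · subst hc; exact hx

-- ---- B's loop is the dedup fold over the pieces ----
lemma altGo_pieces (l : List Char) (out : List String) :
    pvAltGo l out = List.foldl pvAdd out (pvPieces l) := by
  induction l, out using pvAltGo.induct with
  | case1 out => rw [pvAltGo, pvPieces]; simp
  | case2 l out hl s out' ih =>
    rw [pvAltGo, if_neg hl, pvPieces, if_neg hl]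
    simp only []
    rw [List.foldl_append]
    have hstep :
        (if PySem.Chars.strip (l.takeWhile pvNotDelim) ≠ [] ∧
             String.ofList (PySem.Chars.strip (l.takeWhile pvNotDelim)) ∉ out
         then out ++ [String.ofList (PySem.Chars.strip (l.takeWhile pvNotDelim))] else out)
        = List.foldl pvAdd out
            (if PySem.Chars.strip (l.takeWhile pvNotDelim) ≠ [] then
              [String.ofList (PySem.Chars.strip (l.takeWhile pvNotDelim))] else []) := by
      by_cases hs : PySem.Chars.strip (l.takeWhile pvNotDelim) = []
      · simp [hs]
      · simp [hs, pvAdd]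
    rw [← hstep]
    exact ih

-- ---- normalize is the same dedup fold on already-stripped nonempty strings ----
lemma norm_fold : ∀ (pieces : List String) (out : List String) (seen : PySem.Set String),
    (∀ s : String, s ∈ seen ↔ s ∈ out) →
    (∀ s ∈ pieces, PySem.Str.strip s = s ∧ s ≠ "") →
    (List.foldl pvNormStep (out, seen) pieces).1 = List.foldl pvAdd out pieces := by
  intro pieces
  induction pieces with
  | nil => intro out seen _ _; rfl
  | cons p ps ih =>
    intro out seen hmem hstr
    obtain ⟨hp, hpne⟩ := hstr p (by simp)
    simp only [List.foldl_cons, pvNormStep, hp, pvAdd]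
    by_cases hin : p ∈ out
    · rw [if_pos (Or.inr ((hmem p).mpr hin)), if_neg (by simpa using hin)]
      exact ih out seen hmem (fun s hs => hstr s (by simp [hs]))
    · rw [if_neg (by push_neg; exact ⟨hpne, fun h => hin ((hmem p).mp h)⟩), if_pos hin]
      refine ih (out ++ [p]) (seen.add p) ?_ (fun s hs => hstr s (by simp [hs]))
      intro s
      rw [PySem.Set.mem_add]
      simp [hmem s, or_comm]

-- ---- the pieces are stripped and nonempty ----
lemma rstrip_prefix (y : List Char) : PySem.Chars.rstrip y <+: y := by
  unfold PySem.Chars.rstrip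
  have h := List.dropWhile_suffix (p := PySem.Chars.isspace) (l := y.reverse)
  have := h.reverse
  simpa using this

lemma lstrip_of_prefix (y z : List Char) (hz : z <+: y) (hy : PySem.Chars.lstrip y = y) :
    PySem.Chars.lstrip z = z := by
  unfold PySem.Chars.lstrip at *
  cases z with
  | nil => rfl
  | cons a t =>
    obtain ⟨r, hr⟩ := hz
    subst hr
    rw [List.cons_append, List.dropWhile_cons] at hy
    by_cases ha : PySem.Chars.isspace a = true
    · exfalso
      rw [if_pos ha] at hy
      have := congrArg List.length hy
      have hle := List.length_dropWhile_le PySem.Chars.isspace (t ++ r)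
      simp at this hle
      omega
    · rw [List.dropWhile_cons, if_neg ha]

lemma lstrip_idem (y : List Char) :
    PySem.Chars.lstrip (PySem.Chars.lstrip y) = PySem.Chars.lstrip y := by
  unfold PySem.Chars.lstrip
  exact List.dropWhile_idempotent _ _

lemma rstrip_idem (y : List Char) :
    PySem.Chars.rstrip (PySem.Chars.rstrip y) = PySem.Chars.rstrip y := by
  unfold PySem.Chars.rstrip
  rw [List.reverse_reverse, List.dropWhile_idempotent]

lemma strip_sub_idem (l : List Char) :
    PySem.Chars.strip (PySem.Chars.strip l) = PySem.Chars.strip l := by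
  unfold PySem.Chars.strip
  rw [lstrip_of_prefix (PySem.Chars.lstrip l) _ (rstrip_prefix _) (lstrip_idem l)]
  exact rstrip_idem _

lemma pieces_stripped (l : List Char) : ∀ s ∈ pvPieces l, PySem.Str.strip s = s ∧ s ≠ "" := by
  induction l using pvPieces.induct with
  | case1 => rw [pvPieces]; simp
  | case2 l hl ih =>
    rw [pvPieces, if_neg hl]
    intro x hx
    simp only [List.mem_append] at hx
    rcases hx with hx | hx
    · by_cases hn : PySem.Chars.strip (l.takeWhile pvNotDelim) = []
      · simp [hn] at hx
      · simp only [hn, ne_eq, not_false_eq_true, if_true, List.mem_singleton] at hx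
        subst hx
        constructor
        · apply String.toList_inj.mp
          rw [PySem.Str.toList_strip]
          simp [strip_sub_idem]
        · intro hcon
          apply hn
          have := congrArg String.toList hcon
          simpa using this
    · exact ih x hx

lemma strip_nil_all_space (l : List Char) (h : PySem.Chars.strip l = []) :
    ∀ c ∈ l, PySem.Chars.isspace c = true := by
  unfold PySem.Chars.strip PySem.Chars.rstrip PySem.Chars.lstrip at h
  rw [List.reverse_eq_nil_iff, List.dropWhile_eq_nil_iff] at h
  intro c hc
  rcases List.mem_append.mp
      ((List.takeWhile_append_dropWhile (p := PySem.Chars.isspace) (l := l)) ▸ hc) with hc' | hc'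
  · exact List.mem_takeWhile_imp hc'
  · exact h c (List.mem_reverse.mpr hc')

lemma all_space_strip_nil (l : List Char) (h : ∀ c ∈ l, PySem.Chars.isspace c = true) :
    PySem.Chars.strip l = [] := by
  unfold PySem.Chars.strip PySem.Chars.lstrip PySem.Chars.rstrip
  rw [List.dropWhile_eq_nil_iff.mpr h]
  rfl

lemma all_space_pieces (l : List Char) :
    (∀ c ∈ l, PySem.Chars.isspace c = true) → pvPieces l = [] := by
  induction l using pvPieces.induct with
  | case1 => intro _; rw [pvPieces]; simp
  | case2 l hl ih =>
    intro h
    rw [pvPieces, if_neg hl]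
    rw [all_space_strip_nil _ (fun c hc => h c ((List.takeWhile_sublist _).subset hc))]
    simp only [ne_eq, not_true_eq_false, if_false, List.nil_append]
    exact ih (fun c hc =>
      h c ((List.dropWhile_sublist _).subset ((List.drop_sublist _ _).subset hc)))

-- ===== VERDICT (by name: the statement is the Claim_ definition above) =====
theorem tags_from_delimited_text_spec : Claim_equal_tags_from_delimited_text := by
  intro text _
  unfold Spec_tags_from_delimited_text tags_from_delimited_text tags_from_delimited_text_alt
  by_cases hg : PySem.Str.strip text = ""
  · rw [if_pos hg]
    rw [altGo_pieces]
    rw [all_space_pieces _ (strip_nil_all_space _ (by rw [← PySem.Str.toList_strip, hg]; rfl))]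
    rfl
  · rw [if_neg hg]
    rw [altGo_pieces]
    simp only []
    have htl : (PySem.Str.replace (PySem.Str.replace text "\r\n" "\n") "\r" "\n").toList
        = (pvCollapse text.toList).map pvSubst := by
      rw [PySem.Str.toList_replace, PySem.Str.toList_replace]
      rw [show ("\r\n" : String).toList = ['\r', '\n'] from rfl,
          show ("\r" : String).toList = ['\r'] from rfl,
          show ("\n" : String).toList = ['\n'] from rfl]
      rw [rep_rn, rep_r]
    rw [htl]
    rw [List.foldl_map]
    have hfold : (List.foldl (fun st c => pvStepA st (pvSubst c)) ([], []) (pvCollapse text.toList))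
        = List.foldl pvStepA' ([], []) text.toList := by
      rw [show (fun (st : List String × List Char) c => pvStepA st (pvSubst c)) = pvStepA' from rfl]
      exact fold_collapse text.toList ([], [])
    rw [hfold]
    have h1 := foldA_pieces text.toList [] [] (by intro c hc; simp at hc)
    simp only [List.nil_append] at h1
    unfold pvTailApp at h1
    unfold pvNormalizeTagsList
    rw [h1]
    exact norm_fold _ [] _ (by simp [PySem.Set.mem_ofList]) (pieces_stripped _)
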